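-- pv_equiv track=rewrite | github.com/rkaushik29/algorithms | prime_visitation.py | lightBulbs
-- ===== SOURCE A (Python) =====
-- def lightBulbs(states, numbers):
--     prime_list = []
--     for number in numbers:
--         for i in range(2, number+1):
--             if(number % i == 0):
--                 p = 1
--                 for j in range(2, (i //2 + 1)):
--                     if (i % j == 0):
--                         p = 0
--                         break
--
--                 if p == 1:
--                     prime_list += [i]
--     for prime in prime_list:
--         for i in range(prime-1, len(states), prime):
--             if (states[i]==1):
--                 states[i] = 0
--             else:
--                 states[i] = 1
--
--     return states
-- ===== SOURCE B (Python) =====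
-- def lightBulbs(states, numbers):
--     # Distinct prime divisors of each number by trial division up to sqrt(n).
--     primes = []
--     for number in numbers:
--         n = number
--         if n < 2:
--             continue
--         d = 2
--         while d * d <= n:
--             if n % d == 0:
--                 primes.append(d)
--                 while n % d == 0:
--                     n //= d
--             d += 1
--         if n > 1:
--             primes.append(n)
--     # Toggle every prime-th bulb for each collected prime.
--     for p in primes:
--         for i in range(p - 1, len(states), p):
--             states[i] = 0 if states[i] == 1 else 1
--     return states
-- ===== Notes on version B (the rewrite author's own statement) =====
-- stated objective: faster
-- what changed: B collects each number's distinct prime divisors by trial division up to sqrt(n) (dividing each found prime out), instead of A's scan of every i in [2,n] with an inner O(i) primality test per divisor; the toggle phase is unchanged.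
import Mathlib
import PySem

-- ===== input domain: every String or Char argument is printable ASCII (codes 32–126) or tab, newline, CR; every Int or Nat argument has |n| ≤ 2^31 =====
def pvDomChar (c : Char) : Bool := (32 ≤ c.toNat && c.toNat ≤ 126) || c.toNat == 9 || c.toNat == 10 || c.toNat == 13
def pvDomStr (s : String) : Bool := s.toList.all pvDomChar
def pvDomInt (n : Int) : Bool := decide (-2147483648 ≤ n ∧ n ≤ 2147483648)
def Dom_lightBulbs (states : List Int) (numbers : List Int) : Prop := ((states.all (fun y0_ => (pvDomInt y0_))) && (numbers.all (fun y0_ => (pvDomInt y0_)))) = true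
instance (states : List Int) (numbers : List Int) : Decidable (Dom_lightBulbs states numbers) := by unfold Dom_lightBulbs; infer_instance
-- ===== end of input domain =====

-- B replaces A's O(n) divisor scan (with an O(i) primality test per divisor) by trial-division
-- factorization up to sqrt(n); the toggle phase is the same (objective: faster).
-- Both A and B mutate `states` in place in Python; the equivalence proved here is about the
-- returned value (which is that same list object).

-- ===== PORT A =====
-- inner primality loop of A: the 'p' flag with break, over the list range(2, i//2 + 1)
def aCheck (i : Int) : List Int → Int
  | [] => 1
  | j :: js => if PySem.Int.mod i j == 0 then 0 else aCheck i js

-- the two inner loops of A's first phase, for one `number`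
def aCollect (n : Int) : List Int :=
  (PySem.List.pyRange 2 (n+1) 1).foldl (fun acc i =>
    if PySem.Int.mod n i == 0 then
      (if aCheck i (PySem.List.pyRange 2 (PySem.Int.floordiv i 2 + 1) 1) == 1 then acc ++ [i] else acc)
    else acc) []

-- 'for i in range(prime-1, len(states), prime): toggle states[i]'
-- indices are always nonnegative and in range (prime ≥ 2), so states[i] is
-- pyGetD / List.set at i.toNat
def aToggle (p : Int) (states : List Int) : List Int :=
  (PySem.List.pyRange (p-1) (states.length : Int) p).foldl
    (fun st i => if PySem.List.pyGetD st i 0 == 1 then st.set i.toNat 0 else st.set i.toNat 1) states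

def lightBulbs (states : List Int) (numbers : List Int) : List Int :=
  let primeList := numbers.foldl (fun acc n => acc ++ aCollect n) []
  primeList.foldl (fun st p => aToggle p st) states

-- ===== PORT B =====
-- 'while n % d == 0: n //= d' ; the extra guards 2 ≤ d, 1 ≤ m only make the
-- recursion total (they hold at every reachable call); Nat arithmetic is exact here
-- since B's 'if n < 2: continue' guarantees the factored value is nonnegative
def bDivOut (m d : Nat) : Nat :=
  if _h : 2 ≤ d ∧ 1 ≤ m ∧ m % d = 0 then bDivOut (m / d) d else m
termination_by m
decreasing_by exact Nat.div_lt_self (by omega) (by omega)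

theorem bDivOut_le (m d : Nat) : bDivOut m d ≤ m := by
  induction m using bDivOut.induct (d := d) with
  | case1 m h ih => rw [bDivOut, dif_pos h]; exact le_trans ih (Nat.div_le_self _ _)
  | case2 m h => rw [bDivOut, dif_neg h]

-- 'while d * d <= n: …'; on divisibility append d and divide d out fully, finally
-- append the leftover n if it exceeds 1 (guard 2 ≤ d only for totality)
def bFact (m d : Nat) : List Nat :=
  if h : d * d ≤ m ∧ 2 ≤ d then
    if m % d = 0 then d :: bFact (bDivOut (m / d) d) (d+1)
    else bFact m (d+1)
  else if 1 < m then [m] else []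
termination_by m + 1 - d
decreasing_by
  · have h1 : bDivOut (m / d) d ≤ m / d := bDivOut_le _ _
    have h2 : m / d ≤ m := Nat.div_le_self _ _
    have : d ≤ m := le_trans (Nat.le_mul_of_pos_left d (by omega)) h.1
    omega
  · have : d ≤ m := le_trans (Nat.le_mul_of_pos_left d (by omega)) h.1
    omega

-- one `number` of B's first phase ('if n < 2: continue' then trial division on the
-- nonnegative value, which Nat arithmetic ports exactly)
def bFactors (n : Int) : List Int :=
  if n < 2 then [] else (bFact n.toNat 2).map (fun p => Int.ofNat p)

-- B's toggle loop 'for i in range(p-1, len(states), p): states[i] = 0 if states[i] == 1 else 1'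
def bToggle (p : Int) (states : List Int) : List Int :=
  (PySem.List.pyRange (p-1) (states.length : Int) p).foldl
    (fun st i => if PySem.List.pyGetD st i 0 == 1 then st.set i.toNat 0 else st.set i.toNat 1) states

def lightBulbs_alt (states : List Int) (numbers : List Int) : List Int :=
  let primes := numbers.foldl (fun acc n => acc ++ bFactors n) []
  primes.foldl (fun st p => bToggle p st) states

-- ===== PRECONDITION & SPEC =====
def Spec_lightBulbs (states : List Int) (numbers : List Int) (out : List Int) : Prop := out = lightBulbs_alt states numbers
instance (states : List Int) (numbers : List Int) (out : List Int) : Decidable (Spec_lightBulbs states numbers out) := by unfold Spec_lightBulbs; infer_instance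

-- ===== CLAIM (what is proved, stated in full; the proofs are below) =====
def Claim_equal_lightBulbs : Prop := ∀ (states : List Int) (numbers : List Int), Dom_lightBulbs states numbers → Spec_lightBulbs states numbers (lightBulbs states numbers)

-- ===== LEMMAS AND PROOFS =====

-- A's primality flag, characterized
theorem aCheck_eq_one (i : Int) (l : List Int) :
    aCheck i l = 1 ↔ ∀ j ∈ l, ¬ (PySem.Int.mod i j = 0) := by
  induction l with
  | nil => simp [aCheck]
  | cons j js ih =>
    simp only [aCheck, List.mem_cons]
    by_cases h : PySem.Int.mod i j == 0
    · simp only [if_pos h]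
      constructor
      · intro e; exact absurd e (by norm_num)
      · intro hall; exact absurd (beq_iff_eq.mp h) (hall j (Or.inl rfl))
    · simp only [if_neg h, ih]
      constructor
      · intro hall j' hj'
        rcases hj' with e | m
        · subst e; exact fun c => h (beq_iff_eq.mpr c)
        · exact hall j' m
      · intro hall j' m; exact hall j' (Or.inr m)

-- 'no divisor j with 2 ≤ j ≤ k/2' is primality, for k ≥ 2
theorem half_test_prime (k : Nat) (hk : 2 ≤ k) :
    (∀ j : Nat, 2 ≤ j → j ≤ k / 2 → ¬ j ∣ k) ↔ k.Prime := by
  constructor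
  · intro hall
    by_contra hnp
    have hm : k.minFac ∣ k := Nat.minFac_dvd k
    have hmp : k.minFac.Prime := Nat.minFac_prime (by omega)
    have hm2 : 2 ≤ k.minFac := hmp.two_le
    have hmlt : k.minFac ≠ k := fun e => hnp (e ▸ hmp)
    have hmle : k.minFac ≤ k := Nat.le_of_dvd (by omega) hm
    set c := k / k.minFac with hc
    have hck : c ∣ k := Nat.div_dvd_of_dvd hm
    have hkc : k.minFac * c = k := Nat.mul_div_cancel' hm
    have hc2 : 2 ≤ c := by
      rcases Nat.lt_or_ge c 2 with hlt | hge
      · interval_cases c <;> omega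
      · exact hge
    have hchalf : c ≤ k / 2 := by
      rw [hc]; exact Nat.div_le_div_left hm2 (by omega)
    exact hall c hc2 hchalf hck
  · intro hp j h2 hhalf hdvd
    rcases hp.eq_one_or_self_of_dvd j hdvd with e | e
    · omega
    · have hlt : k / 2 < k := Nat.div_lt_self (by omega) (by omega)
      omega

-- the body of A's collection loop, as a filter predicate
def aPred (n : Int) (i : Int) : Bool :=
  (PySem.Int.mod n i == 0) &&
    (aCheck i (PySem.List.pyRange 2 (PySem.Int.floordiv i 2 + 1) 1) == 1)

theorem aCollect_eq_filter (n : Int) :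
    aCollect n = (PySem.List.pyRange 2 (n+1) 1).filter (aPred n) := by
  unfold aCollect
  have hfun : (fun (acc : List Int) i =>
      if PySem.Int.mod n i == 0 then
        (if aCheck i (PySem.List.pyRange 2 (PySem.Int.floordiv i 2 + 1) 1) == 1 then acc ++ [i] else acc)
      else acc)
      = (fun (acc : List Int) i => if aPred n i then acc ++ [(fun x : Int => x) i] else acc) := by
    funext acc i
    unfold aPred
    by_cases h1 : PySem.Int.mod n i == 0 <;>
      by_cases h2 : aCheck i (PySem.List.pyRange 2 (PySem.Int.floordiv i 2 + 1) 1) == 1 <;>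
      simp only [h1, h2, Bool.false_and, Bool.true_and, Bool.and_self, if_true, if_false,
        Bool.false_eq_true]
  rw [hfun, PySem.List.foldl_append_if (aPred n) (fun x : Int => x)]
  simp

-- membership in aCollect n, for n ≥ 2: exactly the primes dividing n
theorem mem_aCollect (n x : Int) (hn : 2 ≤ n) :
    x ∈ aCollect n ↔ 2 ≤ x ∧ x.toNat.Prime ∧ x.toNat ∣ n.toNat := by
  rw [aCollect_eq_filter, List.mem_filter, PySem.List.mem_pyRange_one]
  unfold aPred
  rw [Bool.and_eq_true, beq_iff_eq, beq_iff_eq, aCheck_eq_one]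
  constructor
  · rintro ⟨⟨h2, _⟩, hmod, hchk⟩
    have hdvd : x ∣ n := (PySem.Int.mod_eq_zero_iff_dvd n x).mp hmod
    refine ⟨h2, ?_, ?_⟩
    · set K := x.toNat with hK
      have hxK : x = (K : Int) := by omega
      have hK2 : 2 ≤ K := by omega
      rw [← half_test_prime K hK2]
      intro j hj2 hjhalf hjdvd
      refine hchk (j : Int) ?_ ((PySem.Int.mod_eq_zero_iff_dvd x j).mpr ?_)
      · rw [PySem.List.mem_pyRange_one]
        have hfd : PySem.Int.floordiv x 2 = ((K / 2 : Nat) : Int) := by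
          rw [hxK]; exact_mod_cast PySem.Int.floordiv_natCast K 2
        have : (j : Int) ≤ ((K / 2 : Nat) : Int) := by exact_mod_cast hjhalf
        constructor
        · exact_mod_cast hj2
        · omega
      · rw [hxK]; exact_mod_cast hjdvd
    · have hx : x = ((x.toNat : Nat) : Int) := by omega
      have hn' : n = ((n.toNat : Nat) : Int) := by omega
      rw [hx, hn'] at hdvd
      exact_mod_cast hdvd
  · rintro ⟨h2, hp, hdvd⟩
    have hxb : x ≤ n := by
      have := Nat.le_of_dvd (by omega) hdvd
      omega
    have hdvdI : x ∣ n := by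
      have hx : x = ((x.toNat : Nat) : Int) := by omega
      have hn' : n = ((n.toNat : Nat) : Int) := by omega
      rw [hx, hn']
      exact_mod_cast hdvd
    refine ⟨⟨h2, by omega⟩, (PySem.Int.mod_eq_zero_iff_dvd n x).mpr hdvdI, ?_⟩
    intro j hj hjmod
    rw [PySem.List.mem_pyRange_one] at hj
    have hjd : j ∣ x := (PySem.Int.mod_eq_zero_iff_dvd x j).mp hjmod
    set K := x.toNat with hK
    have hxK : x = (K : Int) := by omega
    have hK2 : 2 ≤ K := by omega
    have hfd : PySem.Int.floordiv x 2 = ((K / 2 : Nat) : Int) := by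
      rw [hxK]; exact_mod_cast PySem.Int.floordiv_natCast K 2
    rw [hfd] at hj
    have hjN : j.toNat ∣ K := by
      have hj' : j = ((j.toNat : Nat) : Int) := by omega
      rw [hj', hxK] at hjd
      exact_mod_cast hjd
    have := (half_test_prime K hK2).mpr hp j.toNat (by omega) (by omega) hjN
    exact this

-- aCollect is strictly increasing
theorem aCollect_pairwise (n : Int) : (aCollect n).Pairwise (· < ·) := by
  rw [aCollect_eq_filter]
  exact (PySem.List.pairwise_lt_pyRange_one 2 (n+1)).filter _

-- facts about bDivOut
theorem bDivOut_pos (m d : Nat) (hm : 1 ≤ m) : 1 ≤ bDivOut m d := by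
  induction m using bDivOut.induct (d := d) with
  | case1 m h ih =>
    rw [bDivOut, dif_pos h]
    have : d ∣ m := Nat.dvd_iff_mod_eq_zero.mpr h.2.2
    have : d ≤ m := Nat.le_of_dvd (by omega) this
    exact ih (by exact (Nat.one_le_div_iff (by omega)).mpr this)
  | case2 m h => rw [bDivOut, dif_neg h]; exact hm

theorem bDivOut_dvd (m d : Nat) : bDivOut m d ∣ m := by
  induction m using bDivOut.induct (d := d) with
  | case1 m h ih =>
    rw [bDivOut, dif_pos h]
    exact dvd_trans ih (Nat.div_dvd_of_dvd (Nat.dvd_iff_mod_eq_zero.mpr h.2.2))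
  | case2 m h => rw [bDivOut, dif_neg h]

theorem bDivOut_not_dvd (m d : Nat) (hd : 2 ≤ d) (hm : 1 ≤ m) : ¬ d ∣ bDivOut m d := by
  induction m using bDivOut.induct (d := d) with
  | case1 m h ih =>
    rw [bDivOut, dif_pos h]
    have hdm : d ∣ m := Nat.dvd_iff_mod_eq_zero.mpr h.2.2
    have : d ≤ m := Nat.le_of_dvd (by omega) hdm
    exact ih ((Nat.one_le_div_iff (by omega)).mpr this)
  | case2 m h =>
    rw [bDivOut, dif_neg h]
    intro hdvd
    exact h ⟨hd, hm, Nat.dvd_iff_mod_eq_zero.mp hdvd⟩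

theorem bDivOut_prime_dvd (m d p : Nat) (hp : p.Prime) (hd : d.Prime) (hne : p ≠ d)
    (hdvd : p ∣ m) : p ∣ bDivOut m d := by
  induction m using bDivOut.induct (d := d) with
  | case1 m h ih =>
    rw [bDivOut, dif_pos h]
    have hdm : d ∣ m := Nat.dvd_iff_mod_eq_zero.mpr h.2.2
    have hco : p.Coprime d := (Nat.coprime_primes hp hd).mpr hne
    have hsplit : d * (m / d) = m := Nat.mul_div_cancel' hdm
    have hpd : p ∣ d * (m / d) := by rw [hsplit]; exact hdvd
    exact ih (hco.dvd_of_dvd_mul_left hpd)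
  | case2 m h => rw [bDivOut, dif_neg h]; exact hdvd

-- B's factorization: soundness, completeness, sortedness — by the trial-division invariant
theorem bFact_spec (m d : Nat) (hm : 1 ≤ m) (hd : 2 ≤ d)
    (hinv : ∀ p : Nat, p.Prime → p ∣ m → d ≤ p) :
    (∀ x ∈ bFact m d, x.Prime ∧ x ∣ m ∧ d ≤ x) ∧
    (∀ p : Nat, p.Prime → p ∣ m → p ∈ bFact m d) ∧
    (bFact m d).Pairwise (· < ·) := by
  induction m, d using bFact.induct with
  | case1 m d h hmod ih =>
    obtain ⟨hsq, hd2⟩ := h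
    have hdm : d ∣ m := Nat.dvd_iff_mod_eq_zero.mpr hmod
    -- d is prime: its minimal factor is a prime divisor of m, hence ≥ d
    have hdp : d.Prime := by
      have h1 : d.minFac.Prime := Nat.minFac_prime (by omega)
      have h2 : d.minFac ∣ m := dvd_trans (Nat.minFac_dvd d) hdm
      have h3 : d ≤ d.minFac := hinv _ h1 h2
      have h4 : d.minFac ≤ d := Nat.minFac_le (by omega)
      exact Nat.prime_def_minFac.mpr ⟨hd2, by omega⟩
    have hddm : d ≤ m := Nat.le_of_dvd (by omega) hdm
    have hm1 : 1 ≤ m / d := (Nat.one_le_div_iff (by omega)).mpr hddm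
    set m' := bDivOut (m / d) d with hm'
    have hm'pos : 1 ≤ m' := bDivOut_pos _ _ hm1
    have hm'dvd : m' ∣ m := dvd_trans (bDivOut_dvd _ _) (Nat.div_dvd_of_dvd hdm)
    have hm'nd : ¬ d ∣ m' := bDivOut_not_dvd _ _ hd2 hm1
    have hinv' : ∀ p : Nat, p.Prime → p ∣ m' → d + 1 ≤ p := by
      intro p hp hpd
      have hpm : p ∣ m := dvd_trans hpd hm'dvd
      have := hinv p hp hpm
      have : p ≠ d := by rintro rfl; exact hm'nd hpd
      omega
    obtain ⟨iha, ihb, ihc⟩ := ih hm'pos (by omega) hinv'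
    rw [bFact, dif_pos ⟨hsq, hd2⟩, if_pos hmod]
    refine ⟨?_, ?_, ?_⟩
    · intro x hx
      rcases List.mem_cons.mp hx with e | hx'
      · subst e; exact ⟨hdp, hdm, le_refl _⟩
      · obtain ⟨hp, hdv, hle⟩ := iha x hx'
        exact ⟨hp, dvd_trans hdv hm'dvd, by omega⟩
    · intro p hp hpm
      by_cases he : p = d
      · subst he; exact List.mem_cons_self
      · have hco : p.Coprime d := (Nat.coprime_primes hp hdp).mpr he
        have hsplit : d * (m / d) = m := Nat.mul_div_cancel' hdm
        have h1 : p ∣ d * (m / d) := by rw [hsplit]; exact hpm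
        have h2 : p ∣ m / d := hco.dvd_of_dvd_mul_left h1
        have h3 : p ∣ m' := bDivOut_prime_dvd _ _ _ hp hdp he h2
        exact List.mem_cons_of_mem _ (ihb p hp h3)
    · rw [List.pairwise_cons]
      refine ⟨?_, ihc⟩
      intro x hx
      have := (iha x hx).2.2
      omega
  | case2 m d h hmod ih =>
    obtain ⟨hsq, hd2⟩ := h
    have hnd : ¬ d ∣ m := fun c => hmod (Nat.dvd_iff_mod_eq_zero.mp c)
    have hinv' : ∀ p : Nat, p.Prime → p ∣ m → d + 1 ≤ p := by
      intro p hp hpm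
      have := hinv p hp hpm
      have : p ≠ d := by rintro rfl; exact hnd hpm
      omega
    obtain ⟨iha, ihb, ihc⟩ := ih hm (by omega) hinv'
    rw [bFact, dif_pos ⟨hsq, hd2⟩, if_neg hmod]
    exact ⟨fun x hx => ⟨(iha x hx).1, (iha x hx).2.1, by have := (iha x hx).2.2; omega⟩, ihb, ihc⟩
  | case3 m d h h1 =>
    rw [bFact, dif_neg h, if_pos h1]
    have hmp : m.Prime := by
      by_contra hnp
      have hf1 : m.minFac.Prime := Nat.minFac_prime (by omega)
      have hf2 : m.minFac ∣ m := Nat.minFac_dvd m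
      have hf3 : d ≤ m.minFac := hinv _ hf1 hf2
      have hf4 : m.minFac ^ 2 ≤ m := Nat.minFac_sq_le_self (by omega) hnp
      have hf5 : ¬ (d * d ≤ m) := fun c => h ⟨c, hd⟩
      have hf6 : d * d ≤ m.minFac * m.minFac := Nat.mul_le_mul hf3 hf3
      have hf7 : m.minFac * m.minFac = m.minFac ^ 2 := by ring
      omega
    refine ⟨?_, ?_, by simp⟩
    · intro x hx
      rcases List.mem_singleton.mp hx with e
      subst e
      exact ⟨hmp, dvd_refl _, hinv _ hmp (dvd_refl _)⟩
    · intro p hp hpm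
      have := (Nat.prime_dvd_prime_iff_eq hp hmp).mp hpm
      simp [this]
  | case4 m d h h1 =>
    rw [bFact, dif_neg h, if_neg h1]
    have hm1' : m = 1 := by omega
    refine ⟨by simp, ?_, by simp⟩
    intro p hp hpm
    rw [hm1'] at hpm
    exact absurd (Nat.dvd_one.mp hpm) hp.one_lt.ne'

-- the two per-number lists coincide
theorem aCollect_eq_bFactors (n : Int) : aCollect n = bFactors n := by
  by_cases hn : n < 2
  · have h1 : aCollect n = [] := by
      unfold aCollect
      rw [PySem.List.pyRange_one_eq_nil (by omega)]
      rfl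
    rw [h1, bFactors, if_pos hn]
  · have hn : (2:Int) ≤ n := by omega
    have hN : 2 ≤ n.toNat := by omega
    have hinv : ∀ p : Nat, p.Prime → p ∣ n.toNat → 2 ≤ p := fun p hp _ => hp.two_le
    obtain ⟨ba, bb, bc⟩ := bFact_spec n.toNat 2 (by omega) (le_refl _) hinv
    rw [bFactors, if_neg (by omega)]
    -- both are strictly increasing with the same membership
    have hmemB : ∀ x : Int, x ∈ (bFact n.toNat 2).map (fun p => Int.ofNat p) ↔
        2 ≤ x ∧ x.toNat.Prime ∧ x.toNat ∣ n.toNat := by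
      intro x
      simp only [List.mem_map, Int.ofNat_eq_natCast]
      constructor
      · rintro ⟨q, hq, rfl⟩
        obtain ⟨hp, hdv, hle⟩ := ba q hq
        exact ⟨by exact_mod_cast hle, by simpa using hp, by simpa using hdv⟩
      · rintro ⟨h2, hp, hdv⟩
        exact ⟨x.toNat, bb x.toNat hp hdv, by omega⟩
    have hpwA := aCollect_pairwise n
    have hpwB : ((bFact n.toNat 2).map (fun p => Int.ofNat p)).Pairwise (· < ·) := by
      rw [List.pairwise_map]
      exact bc.imp (by intro a b hab; simp only [Int.ofNat_eq_natCast]; exact_mod_cast hab)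
    have hndA : (aCollect n).Nodup := hpwA.imp ne_of_lt
    have hndB : ((bFact n.toNat 2).map (fun p => Int.ofNat p)).Nodup := hpwB.imp ne_of_lt
    have hperm : (aCollect n).Perm ((bFact n.toNat 2).map (fun p => Int.ofNat p)) := by
      rw [List.perm_ext_iff_of_nodup hndA hndB]
      intro x
      rw [mem_aCollect n x hn, hmemB]
    exact List.Perm.eq_of_pairwise
      (fun a b _ _ hab hba => absurd hba (lt_asymm hab)) hpwA hpwB hperm

-- ===== VERDICT (by name: the statement is the Claim_ definition above) =====
theorem lightBulbs_spec : Claim_equal_lightBulbs := by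
  intro states numbers _
  unfold Spec_lightBulbs lightBulbs lightBulbs_alt
  have hfeq : bFactors = aCollect := by funext n; exact (aCollect_eq_bFactors n).symm
  have htog : bToggle = aToggle := rfl
  rw [hfeq, htog]
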